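-- pv_equiv track=rewrite | github.com/pypi-data/pypi-mirror-398 | packages/android-widgets/android_widgets-0.1.3-py3-none-any.whl/android_widgets/maker.py | generate_receivers
-- ===== SOURCE A (Python) =====
-- from dataclasses import dataclass
-- from typing import List, Optional
--
-- @dataclass
-- class Receiver:
--     name: str
--     actions: List[str]
--     enabled: bool = True
--     exported: bool = False
--     label: Optional[str] = None
--     meta_name: Optional[str] = "android.appwidget.provider"
--     meta_resource: Optional[str] = None
--
--     def to_xml(self, package: str) -> str:
--         attrs = [
--             f'android:name="{package}.{self.name}"',
--             f'android:enabled="{str(self.enabled).lower()}"',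
--             f'android:exported="{str(self.exported).lower()}"',
--         ]
--
--         if self.label:
--             attrs.append(f'android:label="{self.label}"')
--
--         xml = [f"<receiver {' '.join(attrs)}>"]
--         xml.append("    <intent-filter>")
--
--         for action in self.actions:
--             xml.append(f'        <action android:name="{action}" />')
--
--         xml.append("    </intent-filter>")
--
--         if self.meta_resource:
--             xml.append(
--                 f'    <meta-data android:name="{self.meta_name}"\n'
--                 f'           android:resource="{self.meta_resource}" />'
--             )
--
--         xml.append("</receiver>")
--         return "\n".join(xml)
--
-- def generate_receivers(package: str) -> str:
--     receivers = [
--         Receiver(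
--             name="Action1",
--             actions=["android.intent.action.BOOT_COMPLETED"],
--         ),
--         Receiver(
--             name="SimpleWidget",
--             label="Simple Text",
--             actions=["android.appwidget.action.APPWIDGET_UPDATE"],
--             meta_resource="@xml/widgetproviderinfo",
--         ),
--         Receiver(
--             name="ButtonWidget",
--             label="Counter Button Demo",
--             actions=["android.appwidget.action.APPWIDGET_UPDATE"],
--             meta_resource="@xml/button_widget_provider",
--         ),
--         Receiver(
--             name="Image1",
--             actions=[
--                 "android.intent.action.BOOT_COMPLETED",
--                 "android.appwidget.action.APPWIDGET_UPDATE",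
--             ],
--             meta_resource="@xml/image_test_widget_info",
--         ),
--     ]
--
--     return "\n\n".join(r.to_xml(package) for r in receivers)
-- ===== SOURCE B (Python) =====
-- def generate_receivers(package: str) -> str:
--     return f'''<receiver android:name="{package}.Action1" android:enabled="true" android:exported="false">
--     <intent-filter>
--         <action android:name="android.intent.action.BOOT_COMPLETED" />
--     </intent-filter>
-- </receiver>
--
-- <receiver android:name="{package}.SimpleWidget" android:enabled="true" android:exported="false" android:label="Simple Text">
--     <intent-filter>
--         <action android:name="android.appwidget.action.APPWIDGET_UPDATE" />
--     </intent-filter>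
--     <meta-data android:name="android.appwidget.provider"
--            android:resource="@xml/widgetproviderinfo" />
-- </receiver>
--
-- <receiver android:name="{package}.ButtonWidget" android:enabled="true" android:exported="false" android:label="Counter Button Demo">
--     <intent-filter>
--         <action android:name="android.appwidget.action.APPWIDGET_UPDATE" />
--     </intent-filter>
--     <meta-data android:name="android.appwidget.provider"
--            android:resource="@xml/button_widget_provider" />
-- </receiver>
--
-- <receiver android:name="{package}.Image1" android:enabled="true" android:exported="false">
--     <intent-filter>
--         <action android:name="android.intent.action.BOOT_COMPLETED" />
--         <action android:name="android.appwidget.action.APPWIDGET_UPDATE" />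
--     </intent-filter>
--     <meta-data android:name="android.appwidget.provider"
--            android:resource="@xml/image_test_widget_info" />
-- </receiver>'''
-- ===== Notes on version B (the rewrite author's own statement) =====
-- stated objective: simpler
-- what changed: Replaced the Receiver dataclass, its conditional attribute/meta-data assembly and the per-receiver to_xml loop by four fixed literal template blocks that only interpolate `package`, concatenated directly.
import Mathlib
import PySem

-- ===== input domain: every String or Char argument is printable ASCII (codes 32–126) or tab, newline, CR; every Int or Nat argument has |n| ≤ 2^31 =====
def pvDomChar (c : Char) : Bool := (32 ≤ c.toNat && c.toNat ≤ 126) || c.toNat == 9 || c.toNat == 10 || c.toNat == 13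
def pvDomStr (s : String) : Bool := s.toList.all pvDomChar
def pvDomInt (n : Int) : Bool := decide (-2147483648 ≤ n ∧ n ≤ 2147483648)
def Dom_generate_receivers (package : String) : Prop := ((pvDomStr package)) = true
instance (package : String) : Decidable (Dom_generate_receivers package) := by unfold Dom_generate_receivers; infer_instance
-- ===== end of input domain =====

-- B replaces the Receiver dataclass and its per-receiver XML assembly by four fixed
-- literal template blocks that only interpolate `package` (objective: simpler).

-- ===== PORT A =====
structure PyReceiver where
  name : String
  actions : List String
  enabled : Bool
  exported : Bool
  label : Option String
  meta_name : Option String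
  meta_resource : Option String
deriving Repr

-- truthiness of Optional[str]: `if self.label:` is true iff it is a non-empty string
def pyOptStrTruthy (o : Option String) : Bool :=
  match o with
  | none => false
  | some s => !(PySem.Str.len s == 0)

def PyReceiver.to_xml (r : PyReceiver) (package : String) : String :=
  let attrs : List String :=
    [ "android:name=\"" ++ package ++ "." ++ r.name ++ "\"",
      "android:enabled=\"" ++ PySem.Str.lower (if r.enabled then "True" else "False") ++ "\"",
      "android:exported=\"" ++ PySem.Str.lower (if r.exported then "True" else "False") ++ "\"" ]
  let attrs := if pyOptStrTruthy r.label then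
      attrs ++ ["android:label=\"" ++ (r.label.getD "") ++ "\""]
    else attrs
  let xml : List String := ["<receiver " ++ PySem.Str.join " " attrs ++ ">"]
  let xml := xml ++ ["    <intent-filter>"]
  let xml := r.actions.foldl (fun acc action =>
      acc ++ ["        <action android:name=\"" ++ action ++ "\" />"]) xml
  let xml := xml ++ ["    </intent-filter>"]
  let xml := if pyOptStrTruthy r.meta_resource then
      xml ++ ["    <meta-data android:name=\"" ++ (r.meta_name.getD "") ++ "\"\n"
              ++ "           android:resource=\"" ++ (r.meta_resource.getD "") ++ "\" />"]
    else xml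
  let xml := xml ++ ["</receiver>"]
  PySem.Str.join "\n" xml

def generate_receivers (package : String) : String :=
  let receivers : List PyReceiver :=
    [ { name := "Action1", actions := ["android.intent.action.BOOT_COMPLETED"],
        enabled := true, exported := false, label := none,
        meta_name := some "android.appwidget.provider", meta_resource := none },
      { name := "SimpleWidget", actions := ["android.appwidget.action.APPWIDGET_UPDATE"],
        enabled := true, exported := false, label := some "Simple Text",
        meta_name := some "android.appwidget.provider",
        meta_resource := some "@xml/widgetproviderinfo" },
      { name := "ButtonWidget", actions := ["android.appwidget.action.APPWIDGET_UPDATE"],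
        enabled := true, exported := false, label := some "Counter Button Demo",
        meta_name := some "android.appwidget.provider",
        meta_resource := some "@xml/button_widget_provider" },
      { name := "Image1",
        actions := ["android.intent.action.BOOT_COMPLETED",
                    "android.appwidget.action.APPWIDGET_UPDATE"],
        enabled := true, exported := false, label := none,
        meta_name := some "android.appwidget.provider",
        meta_resource := some "@xml/image_test_widget_info" } ]
  PySem.Str.join "\n\n" (receivers.map (fun r => r.to_xml package))

-- ===== PORT B =====
def generate_receivers_alt (package : String) : String :=
  "<receiver android:name=\"" ++ package ++ ".Action1\" android:enabled=\"true\" android:exported=\"false\">\n    <intent-filter>\n        <action android:name=\"android.intent.action.BOOT_COMPLETED\" />\n    </intent-filter>\n</receiver>\n\n<receiver android:name=\"" ++ package ++ ".SimpleWidget\" android:enabled=\"true\" android:exported=\"false\" android:label=\"Simple Text\">\n    <intent-filter>\n        <action android:name=\"android.appwidget.action.APPWIDGET_UPDATE\" />\n    </intent-filter>\n    <meta-data android:name=\"android.appwidget.provider\"\n           android:resource=\"@xml/widgetproviderinfo\" />\n</receiver>\n\n<receiver android:name=\"" ++ package ++ ".ButtonWidget\" android:enabled=\"true\" android:exported=\"false\"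 android:label=\"Counter Button Demo\">\n    <intent-filter>\n        <action android:name=\"android.appwidget.action.APPWIDGET_UPDATE\" />\n    </intent-filter>\n    <meta-data android:name=\"android.appwidget.provider\"\n           android:resource=\"@xml/button_widget_provider\" />\n</receiver>\n\n<receiver android:name=\"" ++ package ++ ".Image1\" android:enabled=\"true\" android:exported=\"false\">\n    <intent-filter>\n        <action android:name=\"android.intent.action.BOOT_COMPLETED\" />\n        <action android:name=\"android.appwidget.action.APPWIDGET_UPDATE\" />\n    </intent-filter>\n    <meta-data android:name=\"android.appwidget.provider\"\n           android:resource=\"@xml/image_test_widget_info\" />\n</receiver>"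

-- ===== PRECONDITION & SPEC =====
def Spec_generate_receivers (package : String) (out : String) : Prop := out = generate_receivers_alt package
instance (package : String) (out : String) : Decidable (Spec_generate_receivers package out) := by unfold Spec_generate_receivers; infer_instance

-- ===== CLAIM (what is proved, stated in full; the proofs are below) =====
def Claim_equal_generate_receivers : Prop := ∀ (package : String), Dom_generate_receivers package → Spec_generate_receivers package (generate_receivers package)

-- ===== LEMMAS AND PROOFS =====
set_option maxRecDepth 20000
theorem gen_eq (package : String) : generate_receivers package = generate_receivers_alt package := by
  have h : (generate_receivers package).toList = (generate_receivers_alt package).toList := by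
    simp [generate_receivers, generate_receivers_alt, PyReceiver.to_xml, pyOptStrTruthy,
          PySem.Str.join, PySem.Str.lower, PySem.Str.len, PySem.Chars.join,
          PySem.Chars.lower, PySem.Chars.lowerChar, List.intercalate, List.intersperse,
          List.flatten, List.append_assoc, PySem.Chars.isupper]
  calc generate_receivers package = String.ofList (generate_receivers package).toList := by
        simp
    _ = String.ofList (generate_receivers_alt package).toList := by rw [h]
    _ = generate_receivers_alt package := by simp

-- ===== VERDICT (by name: the statement is the Claim_ definition above) =====
theorem generate_receivers_spec : Claim_equal_generate_receivers := by
  intro p _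
  exact gen_eq p
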